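-- pv_equiv track=rewrite | github.com/cwallenpoole/the-oracle | utils/template_utils.py | clean_question_filter
-- ===== SOURCE A (Python) =====
-- def clean_question_filter(text):
--     """Clean question text by removing code blocks and stripping lines"""
--     if not text:
--         return ""
--
--     # Remove code block markers
--     text = text.replace('```', '')
--
--     # Split into lines, strip each line, and rejoin
--     lines = text.split('\n')
--     cleaned_lines = [line.strip() for line in lines]
--
--     # Remove empty lines at the beginning and end
--     while cleaned_lines and not cleaned_lines[0]:
--         cleaned_lines.pop(0)
--     while cleaned_lines and not cleaned_lines[-1]:
--         cleaned_lines.pop()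
--
--     return '\n'.join(cleaned_lines)
-- ===== SOURCE B (Python) =====
-- def clean_question_filter(text):
--     """Clean question text by removing code blocks and stripping lines"""
--     if not text:
--         return ""
--     acc = ""
--     pending = 0
--     for line in text.replace('```', '').split('\n'):
--         s = line.strip()
--         if s:
--             if acc:
--                 acc += '\n' * (pending + 1)
--             acc += s
--             pending = 0
--         else:
--             pending += 1
--     return acc
-- ===== Notes on version B (the rewrite author's own statement) =====
-- stated objective: alternative
-- what changed: Replaces A's staged passes (materialise the stripped-line list, two while/pop loops to trim empty edges, then join) with one streaming fold over the lines that keeps a string accumulator and a pending-empty-line counter, emitting deferred newline separators only when the next nonempty line arrives.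
import Mathlib
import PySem

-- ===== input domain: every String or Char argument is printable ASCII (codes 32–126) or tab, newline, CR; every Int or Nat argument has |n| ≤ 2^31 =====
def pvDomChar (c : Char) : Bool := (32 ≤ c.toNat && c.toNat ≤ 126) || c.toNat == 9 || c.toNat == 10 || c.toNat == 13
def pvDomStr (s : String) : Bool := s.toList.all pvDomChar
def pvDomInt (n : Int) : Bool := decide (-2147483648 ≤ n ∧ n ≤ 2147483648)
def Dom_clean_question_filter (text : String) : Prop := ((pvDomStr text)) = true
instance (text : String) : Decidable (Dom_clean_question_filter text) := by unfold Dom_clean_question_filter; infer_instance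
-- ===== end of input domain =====

-- B replaces A's list materialisation + two edge-trimming pop loops + join by a single
-- streaming fold with a pending-empty-line counter (alternative decomposition, same cost).

-- ===== PORT A =====
-- while cleaned_lines and not cleaned_lines[0]: cleaned_lines.pop(0)
def pyDropLeadEmpty : List (List Char) → List (List Char)
  | [] => []
  | l :: ls => if l = [] then pyDropLeadEmpty ls else l :: ls

-- while cleaned_lines and not cleaned_lines[-1]: cleaned_lines.pop()
def pyDropTrailEmpty : List (List Char) → List (List Char)
  | [] => []
  | l :: ls =>
    match pyDropTrailEmpty ls with
    | [] => if l = [] then [] else [l]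
    | r :: rs => l :: r :: rs

def clean_question_filter (text : String) : String :=
  if text = "" then ""
  else
    let t := PySem.Chars.replace text.toList "```".toList []
    let lines := PySem.Chars.splitOn t ['\n']
    let cleaned := lines.map PySem.Chars.strip
    String.ofList (PySem.Chars.join ['\n'] (pyDropTrailEmpty (pyDropLeadEmpty cleaned)))

-- ===== PORT B =====
-- loop body: state (acc, pending); strip the line, append (deferred separators +) it if nonempty
def bStep (st : List Char × Nat) (line : List Char) : List Char × Nat :=
  let s := PySem.Chars.strip line
  if s ≠ [] then
    let acc := if st.1 ≠ [] then st.1 ++ List.replicate (st.2 + 1) '\n' else st.1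
    (acc ++ s, 0)
  else (st.1, st.2 + 1)

def clean_question_filter_alt (text : String) : String :=
  if text = "" then ""
  else
    let t := PySem.Chars.replace text.toList "```".toList []
    String.ofList (((PySem.Chars.splitOn t ['\n']).foldl bStep ([], 0)).1)

-- ===== PRECONDITION & SPEC =====
def Spec_clean_question_filter (text : String) (out : String) : Prop := out = clean_question_filter_alt text
instance (text : String) (out : String) : Decidable (Spec_clean_question_filter text out) := by unfold Spec_clean_question_filter; infer_instance

-- ===== CLAIM (what is proved, stated in full; the proofs are below) =====
def Claim_equal_clean_question_filter : Prop := ∀ (text : String), Dom_clean_question_filter text → Spec_clean_question_filter text (clean_question_filter text)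

-- ===== LEMMAS AND PROOFS =====

-- the strip-free step (B's step on an already-stripped line)
def bStep' (st : List Char × Nat) (s : List Char) : List Char × Nat :=
  if s ≠ [] then
    ((if st.1 ≠ [] then st.1 ++ List.replicate (st.2 + 1) '\n' else st.1) ++ s, 0)
  else (st.1, st.2 + 1)

theorem foldl_bStep_map (ls : List (List Char)) (st : List Char × Nat) :
    ls.foldl bStep st = (ls.map PySem.Chars.strip).foldl bStep' st := by
  rw [List.foldl_map]
  rfl

-- started state: acc nonempty ⇒ result = acc, plus (pending+1) newlines and the join of
-- the tail with its trailing empties dropped (if anything nonempty remains)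
theorem foldl_started (es : List (List Char)) (acc : List Char) (p : Nat) (h : acc ≠ []) :
    (es.foldl bStep' (acc, p)).1 =
      match pyDropTrailEmpty es with
      | [] => acc
      | ts => acc ++ List.replicate (p + 1) '\n' ++ PySem.Chars.join ['\n'] ts := by
  induction es generalizing acc p with
  | nil => simp [pyDropTrailEmpty]
  | cons l es ih =>
    by_cases hl : l = []
    · subst hl
      rw [show (([] : List Char) :: es).foldl bStep' (acc, p) = es.foldl bStep' (acc, p + 1) from by
        simp [List.foldl_cons, bStep'], ih acc (p + 1) h]
      rcases he : pyDropTrailEmpty es with _ | ⟨r, rs⟩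
      · simp [pyDropTrailEmpty, he]
      · simp only [pyDropTrailEmpty, he]
        rw [show p + 1 + 1 = (p + 1) + 1 from rfl, List.replicate_succ',
          PySem.Chars.join_cons_cons]
        simp
    · have hstep : (l :: es).foldl bStep' (acc, p)
          = es.foldl bStep' (acc ++ List.replicate (p + 1) '\n' ++ l, 0) := by
        simp [List.foldl_cons, bStep', hl, h]
      rw [hstep, ih _ 0 (by simp [hl])]
      rcases he : pyDropTrailEmpty es with _ | ⟨r, rs⟩
      · simp [pyDropTrailEmpty, he, hl, PySem.Chars.join_singleton]
      · simp only [pyDropTrailEmpty, he]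
        rw [PySem.Chars.join_cons_cons]
        simp [List.replicate_succ]

-- unstarted state: B's fold computes exactly A's trim-then-join
theorem foldl_unstarted (es : List (List Char)) (p : Nat) :
    (es.foldl bStep' ([], p)).1
      = PySem.Chars.join ['\n'] (pyDropTrailEmpty (pyDropLeadEmpty es)) := by
  induction es generalizing p with
  | nil => simp [pyDropLeadEmpty, pyDropTrailEmpty, PySem.Chars.join_nil]
  | cons l es ih =>
    by_cases hl : l = []
    · subst hl
      rw [show (([] : List Char) :: es).foldl bStep' ([], p) = es.foldl bStep' ([], p + 1) from by
        simp [List.foldl_cons, bStep'], ih (p + 1)]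
      simp [pyDropLeadEmpty]
    · have hstep : (l :: es).foldl bStep' ([], p) = es.foldl bStep' (l, 0) := by
        simp [List.foldl_cons, bStep', hl]
      rw [hstep, foldl_started es l 0 hl]
      have hlead : pyDropLeadEmpty (l :: es) = l :: es := by simp [pyDropLeadEmpty, hl]
      rw [hlead]
      rcases he : pyDropTrailEmpty es with _ | ⟨r, rs⟩
      · have : pyDropTrailEmpty (l :: es) = [l] := by simp [pyDropTrailEmpty, he, hl]
        simp [this, PySem.Chars.join_singleton]
      · have : pyDropTrailEmpty (l :: es) = l :: r :: rs := by simp [pyDropTrailEmpty, he]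
        rw [this, PySem.Chars.join_cons_cons]
        simp

-- ===== VERDICT (by name: the statement is the Claim_ definition above) =====
theorem clean_question_filter_spec : Claim_equal_clean_question_filter := by
  intro text _
  unfold Spec_clean_question_filter clean_question_filter clean_question_filter_alt
  by_cases h : text = ""
  · rw [if_pos h, if_pos h]
  · rw [if_neg h, if_neg h]
    refine congrArg String.ofList ?_
    rw [foldl_bStep_map, foldl_unstarted]
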